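-- pv_equiv track=rewrite | github.com/thssmonkey/ARCH_KG | kg_django/kg_building/code/main/test/test.py | extract_item
-- ===== SOURCE A (Python) =====
-- def extract_item(origin_sentence):
--     prefixItem = ""
--     sub_len = 0
--     first_num_cnt = 0
--     first_dot_cnt = 0
--     for i in range(len(origin_sentence)):
--         c = origin_sentence[i]
--         if c.isalpha():
--             sub_len = i
--             break;
--         if c.isspace():
--             continue
--         prefixItem += c
--         if c.isdigit():
--             first_num_cnt += 1
--         elif c == '.':
--             first_dot_cnt += 1
--
--     item_level = 4
--     if first_dot_cnt > 0 and first_num_cnt + first_dot_cnt == len(prefixItem):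
--         item_level = 1
--     elif "(" in prefixItem or ")" in prefixItem:
--         item_level = 2
--     elif first_num_cnt + first_dot_cnt > 0:
--         item_level = 3
--     sentence = origin_sentence[sub_len:]
--     return item_level, prefixItem, sentence
--
--     '''
--     space_index = -1
--     for i in range(sen_len):
--         if i + 1 < sen_len and origin_sentence[i].isspace() and origin_sentence[i + 1].isalpha():
--             space_index = i
--             break;
--
--     if space_index != -1:
--         for i in range(space_index):
--             c = origin_sentence[i]
--             if c.isspace():
--                 continue
--             if c.isnumeric() or c == '.':
--                 haveItem = True
--                 prefixItem += c
--             else: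
--                 haveItem = False
--                 break
--
--     sentence = origin_sentence
--     if space_index != -1:
--         sentence = origin_sentence[space_index + 1:]
--     return haveItem, prefixItem, sentence
--     '''
-- ===== SOURCE B (Python) =====
-- def extract_item(origin_sentence):
--     idx = next((i for i, c in enumerate(origin_sentence) if c.isalpha()), None)
--     if idx is None:
--         sub_len, region = 0, origin_sentence
--     else:
--         sub_len, region = idx, origin_sentence[:idx]
--     prefixItem = ''.join(c for c in region if not c.isspace())
--     first_num_cnt = sum(c.isdigit() for c in prefixItem)
--     first_dot_cnt = prefixItem.count('.')
--     if first_dot_cnt > 0 and first_num_cnt + first_dot_cnt == len(prefixItem):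
--         item_level = 1
--     elif "(" in prefixItem or ")" in prefixItem:
--         item_level = 2
--     elif first_num_cnt + first_dot_cnt > 0:
--         item_level = 3
--     else:
--         item_level = 4
--     return item_level, prefixItem, origin_sentence[sub_len:]
-- ===== Notes on version B (the rewrite author's own statement) =====
-- stated objective: simpler
-- what changed: Replaced A's single index loop carrying four accumulators (prefix string, break index, digit and dot counters) by separate passes: find the first alphabetic index, slice the prefix region, then filter out spaces and count digits/dots on the result; classification unchanged.
import Mathlib
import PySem

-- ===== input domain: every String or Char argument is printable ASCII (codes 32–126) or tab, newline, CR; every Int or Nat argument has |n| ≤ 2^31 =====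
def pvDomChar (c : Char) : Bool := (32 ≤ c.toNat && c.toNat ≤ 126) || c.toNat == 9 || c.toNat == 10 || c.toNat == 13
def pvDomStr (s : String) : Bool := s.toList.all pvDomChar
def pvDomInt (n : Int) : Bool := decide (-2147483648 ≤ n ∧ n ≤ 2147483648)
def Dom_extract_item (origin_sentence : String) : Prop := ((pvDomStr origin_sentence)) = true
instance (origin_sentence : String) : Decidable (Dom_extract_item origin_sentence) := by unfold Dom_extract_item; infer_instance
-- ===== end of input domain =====

-- B separates boundary-finding (first alphabetic index) from counting (filter/countP/count passes),
-- replacing A's single multi-accumulator loop; objective: simpler decomposition, same cost.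

-- ===== PORT A =====
-- A's for-loop over indices: carries prefixItem, num/dot counters; breaking on an alpha char
-- returns its index as sub_len, falling off the end leaves sub_len = 0 (as in the Python).
def pvLoopA : List Char → Nat → List Char → Int → Int → (List Char × Nat × Int × Int)
  | [], _, pfx, nc, dc => (pfx, 0, nc, dc)
  | c :: rest, i, pfx, nc, dc =>
    if PySem.Chars.isalpha c then (pfx, i, nc, dc)
    else if PySem.Chars.isspace c then pvLoopA rest (i+1) pfx nc dc
    else if PySem.Chars.isdigit c then pvLoopA rest (i+1) (pfx ++ [c]) (nc+1) dc
    else if c = '.' then pvLoopA rest (i+1) (pfx ++ [c]) nc (dc+1)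
    else pvLoopA rest (i+1) (pfx ++ [c]) nc dc

def extract_item (origin_sentence : String) : Int × String × String :=
  let r := pvLoopA origin_sentence.toList 0 [] 0 0
  let prefixItem := r.1
  let sub_len := r.2.1
  let first_num_cnt := r.2.2.1
  let first_dot_cnt := r.2.2.2
  let item_level : Int :=
    if first_dot_cnt > 0 ∧ first_num_cnt + first_dot_cnt = (prefixItem.length : Int) then 1
    else if ('(' ∈ prefixItem ∨ ')' ∈ prefixItem) then 2
    else if first_num_cnt + first_dot_cnt > 0 then 3
    else 4
  (item_level, String.ofList prefixItem,
    String.ofList (PySem.List.slice origin_sentence.toList (some (sub_len : Int)) none))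

-- ===== PORT B =====
def extract_item_alt (origin_sentence : String) : Int × String × String :=
  let cs := origin_sentence.toList
  let sr : Nat × List Char :=
    match cs.findIdx? PySem.Chars.isalpha with
    | none => (0, cs)
    | some i => (i, cs.take i)
  let prefixItem := sr.2.filter (fun c => !PySem.Chars.isspace c)
  let first_num_cnt : Int := prefixItem.countP PySem.Chars.isdigit
  let first_dot_cnt : Int := prefixItem.count '.'
  let item_level : Int :=
    if first_dot_cnt > 0 ∧ first_num_cnt + first_dot_cnt = (prefixItem.length : Int) then 1
    else if ('(' ∈ prefixItem ∨ ')' ∈ prefixItem) then 2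
    else if first_num_cnt + first_dot_cnt > 0 then 3
    else 4
  (item_level, String.ofList prefixItem, String.ofList (cs.drop sr.1))

-- ===== PRECONDITION & SPEC =====
def Spec_extract_item (origin_sentence : String) (out : Int × String × String) : Prop := out = extract_item_alt origin_sentence
instance (origin_sentence : String) (out : Int × String × String) : Decidable (Spec_extract_item origin_sentence out) := by unfold Spec_extract_item; infer_instance

-- ===== CLAIM (what is proved, stated in full; the proofs are below) =====
def Claim_equal_extract_item : Prop := ∀ (origin_sentence : String), Dom_extract_item origin_sentence → Spec_extract_item origin_sentence (extract_item origin_sentence)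

-- ===== LEMMAS AND PROOFS =====

lemma pvLoopA_spec (cs : List Char) (i : Nat) (pfx : List Char) (nc dc : Int) :
    pvLoopA cs i pfx nc dc =
      match cs.findIdx? PySem.Chars.isalpha with
      | some j =>
          (pfx ++ (cs.take j).filter (fun c => !PySem.Chars.isspace c), i + j,
           nc + ((cs.take j).filter (fun c => !PySem.Chars.isspace c)).countP PySem.Chars.isdigit,
           dc + ((cs.take j).filter (fun c => !PySem.Chars.isspace c)).count '.')
      | none =>
          (pfx ++ cs.filter (fun c => !PySem.Chars.isspace c), 0,
           nc + (cs.filter (fun c => !PySem.Chars.isspace c)).countP PySem.Chars.isdigit,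
           dc + (cs.filter (fun c => !PySem.Chars.isspace c)).count '.') := by
  induction cs generalizing i pfx nc dc with
  | nil => simp [pvLoopA]
  | cons c rest ih =>
    by_cases hA : PySem.Chars.isalpha c = true
    · simp [pvLoopA, hA, List.findIdx?_cons]
    · have hcons : (c :: rest).findIdx? PySem.Chars.isalpha
          = (rest.findIdx? PySem.Chars.isalpha).map (· + 1) := by
        simp [List.findIdx?_cons, hA]
      by_cases hS : PySem.Chars.isspace c = true
      · have step : pvLoopA (c :: rest) i pfx nc dc = pvLoopA rest (i+1) pfx nc dc := by
          simp only [pvLoopA]; rw [if_neg hA, if_pos hS]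
        rw [step, ih, hcons]
        cases hidx : rest.findIdx? PySem.Chars.isalpha <;>
          simp [List.filter_cons, hS] <;> omega
      · by_cases hD : PySem.Chars.isdigit c = true
        · have hne : c ≠ '.' := by
            intro hc; subst hc; exact absurd hD (by decide)
          have step : pvLoopA (c :: rest) i pfx nc dc
              = pvLoopA rest (i+1) (pfx ++ [c]) (nc+1) dc := by
            simp only [pvLoopA]; rw [if_neg hA, if_neg hS, if_pos hD]
          rw [step, ih, hcons]
          cases hidx : rest.findIdx? PySem.Chars.isalpha <;>
            simp [List.filter_cons, hS, List.countP_cons, hD, List.count_cons, hne] <;>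
            omega
        · by_cases hP : c = '.'
          · have step : pvLoopA (c :: rest) i pfx nc dc
                = pvLoopA rest (i+1) (pfx ++ [c]) nc (dc+1) := by
              simp only [pvLoopA]; rw [if_neg hA, if_neg hS, if_neg hD, if_pos hP]
            rw [step, ih, hcons]
            subst hP
            cases hidx : rest.findIdx? PySem.Chars.isalpha <;>
              simp [List.filter_cons, List.countP_cons, List.count_cons,
                show PySem.Chars.isspace '.' = false from rfl,
                show PySem.Chars.isdigit '.' = false from rfl] <;>
              omega
          · have step : pvLoopA (c :: rest) i pfx nc dc
                = pvLoopA rest (i+1) (pfx ++ [c]) nc dc := by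
              simp only [pvLoopA]; rw [if_neg hA, if_neg hS, if_neg hD, if_neg hP]
            rw [step, ih, hcons]
            cases hidx : rest.findIdx? PySem.Chars.isalpha <;>
              simp [List.filter_cons, hS, List.countP_cons, hD, List.count_cons, hP] <;>
              omega

-- ===== VERDICT (by name: the statement is the Claim_ definition above) =====
theorem extract_item_spec : Claim_equal_extract_item := by
  intro s _
  unfold Spec_extract_item extract_item extract_item_alt
  rw [pvLoopA_spec]
  cases h : s.toList.findIdx? PySem.Chars.isalpha with
  | none => simp [h]
  | some j => simp [h, PySem.List.slice_from_natCast]
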